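-- pv_equiv track=rewrite | github.com/a56342003/Sentiment-10K-on-Mutifactor-Model | Extractor.py | headerclean
-- ===== SOURCE A (Python) =====
-- def headerclean(content):
--     mark0=0
--     strings1=['</SEC-HEADER>','</IMS-HEADER>']
--     for x, line in enumerate(content.split('\n')):
--         line=line.strip()
--         if any(s in line for s in strings1):
--             mark0=x
--             break
--     return '\n'.join(content.split('\n')[mark0:])
-- ===== SOURCE B (Python) =====
-- def headerclean(content):
--     markers = ('</SEC-HEADER>', '</IMS-HEADER>')
--     positions = [p for p in (content.find(m) for m in markers) if p != -1]
--     if not positions: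
--         return content
--     start = content.rfind('\n', 0, min(positions)) + 1
--     return content[start:]
-- ===== Notes on version B (the rewrite author's own statement) =====
-- stated objective: alternative
-- what changed: Replaces the split-into-lines scan (enumerate, strip, per-line substring tests, then re-join of the line slice) by a direct substring search: take the earliest content.find position of either marker, back up to the enclosing line start with a bounded rfind of the newline character, and return the tail slice of content.
import Mathlib
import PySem

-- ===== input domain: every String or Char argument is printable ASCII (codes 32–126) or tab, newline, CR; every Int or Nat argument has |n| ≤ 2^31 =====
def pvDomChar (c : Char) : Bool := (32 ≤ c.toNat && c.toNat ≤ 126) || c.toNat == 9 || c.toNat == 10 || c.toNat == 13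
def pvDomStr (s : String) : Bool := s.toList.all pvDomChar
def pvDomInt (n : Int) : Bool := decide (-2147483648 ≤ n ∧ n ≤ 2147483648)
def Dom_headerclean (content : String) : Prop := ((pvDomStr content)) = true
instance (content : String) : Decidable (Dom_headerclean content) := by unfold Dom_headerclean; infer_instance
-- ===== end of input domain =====

-- B replaces A's split-into-lines scan by a direct substring search: find the earliest
-- marker position and back up to the enclosing line start with a bounded rfind.

-- ===== PORT A =====
-- strings1 = ['</SEC-HEADER>', '</IMS-HEADER>']
def pvMarksA : List (List Char) := ["</SEC-HEADER>".toList, "</IMS-HEADER>".toList]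

-- any(s in line for s in strings1), applied to line.strip()
def pvMatches (line : List Char) : Bool :=
  pvMarksA.any (fun s => PySem.Chars.isIn s (PySem.Chars.strip line))

-- the 'for x, line in enumerate(...)' loop with break: returns the index of the first
-- line whose strip() contains a marker; mark0 stays 0 when the loop finishes without break
def pvFindMark : Nat → List (List Char) → Nat
  | _, [] => 0
  | x, line :: rest => if pvMatches line then x else pvFindMark (x + 1) rest

-- content.split('\n') = Chars.splitOn (sep "\n" is non-empty, so split? = some (splitOn))
def headerclean (content : String) : String :=
  let lines := PySem.Chars.splitOn content.toList ['\n']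
  let mark0 := pvFindMark 0 lines
  String.ofList (PySem.Chars.join ['\n'] (PySem.List.slice lines (some (mark0 : Int)) none))

-- ===== PORT B =====
def pvMarksB : List (List Char) := ["</SEC-HEADER>".toList, "</IMS-HEADER>".toList]

-- positions = [p for p in (content.find(m) for m in markers) if p != -1];
-- min? = none  ⟺  positions is empty ('if not positions: return content'), else min(positions)
def headerclean_alt (content : String) : String :=
  let cs := content.toList
  let positions := (pvMarksB.map (fun m => PySem.Chars.find cs m)).filter (fun p => p != -1)
  match PySem.List.min? positions (fun p => p) with
  | none => content
  | some pmin =>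
    let start := PySem.Chars.rfindFrom cs ['\n'] 0 (some pmin) + 1
    String.ofList (PySem.List.slice cs (some start) none)

-- ===== PRECONDITION & SPEC =====
def Spec_headerclean (content : String) (out : String) : Prop := out = headerclean_alt content
instance (content : String) (out : String) : Decidable (Spec_headerclean content out) := by unfold Spec_headerclean; infer_instance

-- ===== CLAIM (what is proved, stated in full; the proofs are below) =====
def Claim_equal_headerclean : Prop := ∀ (content : String), Dom_headerclean content → Spec_headerclean content (headerclean content)

-- ===== LEMMAS AND PROOFS =====

-- proof-side model of content.split('\n'): accumulate the current chunk in `pre`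
def pvSplit (pre : List Char) : List Char → List (List Char)
  | [] => [pre]
  | x :: rest => if x = '\n' then pre :: pvSplit [] rest else pvSplit (pre ++ [x]) rest

theorem pvSplit_cons (pre : List Char) (c : Char) (rest : List Char) :
    pvSplit pre (c :: rest) = if c = '\n' then pre :: pvSplit [] rest else pvSplit (pre ++ [c]) rest := rfl

theorem go_nil (f : Nat) (cur : List Char) (acc : List (List Char)) :
    PySem.Chars.splitOn.go ['\n'] (f+1) [] cur acc = (cur.reverse :: acc).reverse := by
  rw [PySem.Chars.splitOn.go]; omega

theorem go_cons (f : Nat) (c : Char) (rest cur : List Char) (acc : List (List Char)) :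
    PySem.Chars.splitOn.go ['\n'] (f+1) (c :: rest) cur acc =
      if c = '\n' then PySem.Chars.splitOn.go ['\n'] f rest [] (cur.reverse :: acc)
      else PySem.Chars.splitOn.go ['\n'] f rest (c :: cur) acc := by
  by_cases hc : c = '\n'
  · subst hc; rw [PySem.Chars.splitOn.go]; simp [List.isPrefixOf]
  · rw [PySem.Chars.splitOn.go]; simp [List.isPrefixOf, hc, Ne.symm hc]

theorem pvSplit_go : ∀ (fuel : Nat) (l cur : List Char) (acc : List (List Char)), l.length < fuel →
    PySem.Chars.splitOn.go ['\n'] fuel l cur acc = acc.reverse ++ pvSplit cur.reverse l := by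
  intro fuel
  induction fuel with
  | zero => intro l cur acc h; omega
  | succ f ih =>
    intro l cur acc h
    cases l with
    | nil => rw [go_nil]; simp [pvSplit]
    | cons c rest =>
      rw [go_cons]
      by_cases hc : c = '\n'
      · rw [if_pos hc, ih rest [] (cur.reverse :: acc) (by simp at h; omega)]
        simp [pvSplit, hc]
      · rw [if_neg hc, ih rest (c :: cur) acc (by simp at h; omega)]
        simp [pvSplit, hc]

theorem splitOn_eq_pvSplit (s : List Char) :
    PySem.Chars.splitOn s ['\n'] = pvSplit [] s := by
  unfold PySem.Chars.splitOn
  simpa using pvSplit_go (s.length + 1) s [] [] (by omega)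

theorem pvSplit_ne_nil (pre l : List Char) : pvSplit pre l ≠ [] := by
  induction l generalizing pre with
  | nil => simp [pvSplit]
  | cons c rest ih => by_cases hc : c = '\n' <;> simp [pvSplit, hc, ih]

theorem join_pvSplit (l pre : List Char) :
    PySem.Chars.join ['\n'] (pvSplit pre l) = pre ++ l := by
  induction l generalizing pre with
  | nil => simp [pvSplit, PySem.Chars.join_singleton]
  | cons c rest ih =>
    by_cases hc : c = '\n'
    · subst hc
      rw [pvSplit_cons, if_pos rfl]
      cases hq : pvSplit [] rest with
      | nil => exact absurd hq (pvSplit_ne_nil [] rest)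
      | cons q t =>
        rw [PySem.Chars.join_cons_cons]
        rw [← hq, ih]
        simp
    · rw [pvSplit_cons, if_neg hc, ih]
      simp

theorem pvSplit_no_nl {l : List Char} (h : '\n' ∉ l) (pre : List Char) :
    pvSplit pre l = [pre ++ l] := by
  induction l generalizing pre with
  | nil => simp [pvSplit]
  | cons c rest ih =>
    simp only [List.mem_cons, not_or] at h
    rw [pvSplit_cons, if_neg (fun hh => h.1 hh.symm), ih h.2]
    simp

theorem pvSplit_append {l : List Char} (h : '\n' ∉ l) (pre rest : List Char) :
    pvSplit pre (l ++ '\n' :: rest) = (pre ++ l) :: pvSplit [] rest := by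
  induction l generalizing pre with
  | nil => simp [pvSplit]
  | cons c l' ih =>
    simp only [List.mem_cons, not_or] at h
    rw [List.cons_append, pvSplit_cons, if_neg (fun hh => h.1 hh.symm), ih h.2]
    simp

theorem mem_pvSplit_infix {line : List Char} {pre l : List Char}
    (h : line ∈ pvSplit pre l) : line <:+: pre ++ l := by
  induction l generalizing pre with
  | nil => simp_all [pvSplit]
  | cons c rest ih =>
    by_cases hc : c = '\n'
    · subst hc
      rw [pvSplit_cons, if_pos rfl, List.mem_cons] at h
      rcases h with rfl | h
      · exact (List.prefix_append line _).isInfix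
      · have h1 : line <:+: rest := by simpa using ih h
        exact h1.trans ⟨pre ++ ['\n'], [], by simp⟩
    · rw [pvSplit_cons, if_neg hc] at h
      simpa using ih h

theorem strip_infix (l : List Char) : PySem.Chars.strip l <:+: l := by
  unfold PySem.Chars.strip PySem.Chars.rstrip PySem.Chars.lstrip
  have h1 : (List.dropWhile PySem.Chars.isspace (List.dropWhile PySem.Chars.isspace l).reverse).reverse
      <+: List.dropWhile PySem.Chars.isspace l := by
    simpa using List.reverse_prefix.mpr
      (List.dropWhile_suffix (l := (List.dropWhile PySem.Chars.isspace l).reverse) PySem.Chars.isspace)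
  exact h1.isInfix.trans (List.dropWhile_suffix _).isInfix

theorem infix_dropWhile {m l : List Char} {a : Char} (h1 : m.head? = some a)
    (ha : PySem.Chars.isspace a = false) (h : m <:+: l) :
    m <:+: l.dropWhile PySem.Chars.isspace := by
  induction l with
  | nil => simp_all
  | cons x l' ih =>
    rw [List.infix_cons_iff] at h
    rw [List.dropWhile_cons]
    by_cases hx : PySem.Chars.isspace x = true
    · rw [if_pos hx]
      rcases h with hp | hs
      · obtain ⟨m', rfl⟩ : ∃ t, m = a :: t := by
          cases m with
          | nil => simp at h1
          | cons y t => exact ⟨t, by simp_all⟩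
        rw [List.cons_prefix_cons] at hp
        rw [hp.1] at ha
        rw [ha] at hx
        simp at hx
      · exact ih hs
    · rw [if_neg hx]
      rw [← List.infix_cons_iff] at h
      exact h

theorem infix_strip {m l : List Char} {a b : Char} (h1 : m.head? = some a)
    (ha : PySem.Chars.isspace a = false) (h2 : m.getLast? = some b)
    (hb : PySem.Chars.isspace b = false) (h : m <:+: l) :
    m <:+: PySem.Chars.strip l := by
  unfold PySem.Chars.strip PySem.Chars.rstrip PySem.Chars.lstrip
  have s1 : m <:+: List.dropWhile PySem.Chars.isspace l := infix_dropWhile h1 ha h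
  have s2 : m.reverse <:+: (List.dropWhile PySem.Chars.isspace l).reverse :=
    List.reverse_infix.mpr s1
  have h2' : m.reverse.head? = some b := by rw [List.head?_reverse]; exact h2
  have s3 := infix_dropWhile h2' hb s2
  simpa using List.reverse_infix.mpr s3

theorem prefix_split {m X Y : List Char} (hm : '\n' ∉ m)
    (h : m <+: X ++ '\n' :: Y) : m <+: X := by
  induction m generalizing X with
  | nil => simp
  | cons a m' ih =>
    simp only [List.mem_cons, not_or] at hm
    cases X with
    | nil =>
      rw [List.nil_append, List.cons_prefix_cons] at h
      exact absurd h.1.symm hm.1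
    | cons x X' =>
      rw [List.cons_append, List.cons_prefix_cons] at h
      exact (List.cons_prefix_cons).mpr ⟨h.1, ih hm.2 h.2⟩

theorem infix_split {m X Y : List Char} (hm : '\n' ∉ m)
    (h : m <:+: X ++ '\n' :: Y) : m <:+: X ∨ m <:+: Y := by
  induction X with
  | nil =>
    rw [List.nil_append, List.infix_cons_iff] at h
    rcases h with hp | hs
    · have := prefix_split (X := []) hm (by simpa using hp)
      simp at this
      exact Or.inl (by simp [this])
    · exact Or.inr hs
  | cons x X' ih =>
    rw [List.cons_append, List.infix_cons_iff] at h
    rcases h with hp | hs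
    · exact Or.inl (prefix_split hm (by simpa using hp)).isInfix
    · rcases ih hs with h' | h'
      · exact Or.inl (h'.trans ⟨[x], [], by simp⟩)
      · exact Or.inr h'

theorem join_infix {m : List Char} (hm : '\n' ∉ m) (hne : m ≠ []) :
    ∀ (ls : List (List Char)), m <:+: PySem.Chars.join ['\n'] ls → ∃ line ∈ ls, m <:+: line := by
  intro ls
  induction ls with
  | nil =>
    intro h
    rw [PySem.Chars.join_nil] at h
    exact absurd (List.eq_nil_of_infix_nil h) hne
  | cons a t ih =>
    intro h
    cases t with
    | nil =>
      rw [PySem.Chars.join_singleton] at h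
      exact ⟨a, by simp, h⟩
    | cons b t' =>
      rw [PySem.Chars.join_cons_cons] at h
      rw [show a ++ ['\n'] ++ PySem.Chars.join ['\n'] (b :: t') =
        a ++ '\n' :: PySem.Chars.join ['\n'] (b :: t') by simp] at h
      rcases infix_split hm h with h' | h'
      · exact ⟨a, by simp, h'⟩
      · obtain ⟨line, hmem, hl⟩ := ih h'
        exact ⟨line, by simp [hmem], hl⟩

theorem find_eq_of {s sub : List Char} {j : Nat} (hj : sub <+: s.drop j)
    (hmin : ∀ i < j, ¬ sub <+: s.drop i) : PySem.Chars.find s sub = j := by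
  have hin : PySem.Chars.isIn sub s = true :=
    (PySem.Chars.exists_prefix_drop_iff_isIn sub s).mp ⟨j, hj⟩
  have h0 : 0 ≤ PySem.Chars.find s sub :=
    (PySem.Chars.find_nonneg_iff s sub).mpr ((PySem.Chars.isIn_iff_infix sub s).mp hin)
  obtain ⟨hpre, hmin'⟩ := PySem.Chars.find_spec h0
  have hnlt : ¬ (PySem.Chars.find s sub).toNat < j := fun hlt => hmin _ hlt hpre
  have hnlt' : ¬ j < (PySem.Chars.find s sub).toNat := fun hlt => hmin' _ hlt hj
  omega

theorem find_shift {m l rest : List Char} (hm : '\n' ∉ m) (hl : ¬ m <:+: l) :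
    PySem.Chars.find (l ++ '\n' :: rest) m =
      if PySem.Chars.find rest m = -1 then -1
      else (l.length + 1 : Int) + PySem.Chars.find rest m := by
  by_cases hr : PySem.Chars.find rest m = -1
  · rw [if_pos hr]
    rw [PySem.Chars.find_eq_neg_one_iff] at hr ⊢
    intro hc
    rcases infix_split hm hc with h' | h'
    · exact hl h'
    · exact hr h'
  · rw [if_neg hr]
    have h0 : 0 ≤ PySem.Chars.find rest m := by
      have := PySem.Chars.neg_one_le_find rest m; omega
    obtain ⟨hpre, hmin⟩ := PySem.Chars.find_spec h0
    set r := (PySem.Chars.find rest m).toNat with hrdef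
    have : PySem.Chars.find (l ++ '\n' :: rest) m = (l.length + 1 + r : Nat) := by
      apply find_eq_of
      · rw [show l.length + 1 + r = l.length + (r + 1) by omega,
          List.drop_length_add_append, List.drop_succ_cons]
        exact hpre
      · intro i hi hcontra
        by_cases hil : i ≤ l.length
        · rw [List.drop_append_of_le_length hil] at hcontra
          have : m <+: l.drop i := prefix_split hm hcontra
          exact hl (this.isInfix.trans (List.drop_suffix i l).isInfix)
        · have : i = l.length + ((i - l.length - 1) + 1) := by omega
          rw [this, List.drop_length_add_append, List.drop_succ_cons] at hcontra
          exact hmin _ (by omega) hcontra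
    rw [this]
    push_cast
    omega

theorem find_lt_of_infix_left {m l : List Char} (t : List Char) (h : m <:+: l) (hm : m ≠ []) :
    0 ≤ PySem.Chars.find (l ++ t) m ∧ (PySem.Chars.find (l ++ t) m).toNat < l.length := by
  have h0l : 0 ≤ PySem.Chars.find l m := (PySem.Chars.find_nonneg_iff l m).mpr h
  obtain ⟨hp, _⟩ := PySem.Chars.find_spec h0l
  set f := (PySem.Chars.find l m).toNat with hf
  have hlen : m.length ≤ l.length - f := by simpa using hp.length_le
  have hflen : f ≤ l.length := by
    have := PySem.Chars.find_le_length l m; omega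
  have hmlen : 1 ≤ m.length := List.length_pos_of_ne_nil hm
  have hprefix : m <+: (l ++ t).drop f := by
    rw [List.drop_append_of_le_length hflen]
    exact hp.trans (List.prefix_append _ _)
  have h0 : 0 ≤ PySem.Chars.find (l ++ t) m :=
    (PySem.Chars.find_nonneg_iff _ m).mpr (h.trans (List.prefix_append l t).isInfix)
  obtain ⟨_, hmin⟩ := PySem.Chars.find_spec h0
  have : ¬ f < (PySem.Chars.find (l ++ t) m).toNat := fun hlt => hmin _ hlt hprefix
  exact ⟨h0, by omega⟩

theorem rfind_go_zero (s sub : List Char) :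
    PySem.Chars.rfind.go s sub 0 = if sub.isPrefixOf s then 0 else -1 := by
  rw [PySem.Chars.rfind.go]

theorem rfind_go_succ (s sub : List Char) (j : Nat) :
    PySem.Chars.rfind.go s sub (j+1) =
      if sub.isPrefixOf (s.drop (j+1)) then ((j+1 : Nat) : Int) else PySem.Chars.rfind.go s sub j := by
  rw [PySem.Chars.rfind.go]

theorem rfind_go_neg (s sub : List Char) :
    ∀ (k : Nat), (∀ i ≤ k, ¬ sub <+: s.drop i) → PySem.Chars.rfind.go s sub k = -1 := by
  intro k
  induction k with
  | zero =>
    intro h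
    rw [rfind_go_zero, if_neg]
    simp only [List.isPrefixOf_iff_prefix]
    simpa using h 0 (le_refl 0)
  | succ j ih =>
    intro h
    rw [rfind_go_succ, if_neg, ih (fun i hi => h i (by omega))]
    simp only [List.isPrefixOf_iff_prefix]
    exact h (j+1) (le_refl _)

theorem rfind_eq_neg {X sub : List Char} (h : ∀ i, ¬ sub <+: X.drop i) :
    PySem.Chars.rfind X sub = -1 := by
  unfold PySem.Chars.rfind
  exact rfind_go_neg X sub X.length (fun i _ => h i)

theorem rfind_no_nl {X : List Char} (h : '\n' ∉ X) :
    PySem.Chars.rfind X ['\n'] = -1 := by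
  apply rfind_eq_neg
  intro i hc
  obtain ⟨t, ht⟩ := hc
  have : '\n' ∈ X.drop i := by rw [← ht]; simp
  exact h (List.mem_of_mem_drop this)

theorem rfind_go_eq (s sub : List Char) :
    ∀ (k j : Nat), j ≤ k → sub <+: s.drop j → (∀ i, j < i → i ≤ k → ¬ sub <+: s.drop i) →
      PySem.Chars.rfind.go s sub k = j := by
  intro k
  induction k with
  | zero =>
    intro j hjk hj _
    interval_cases j
    have hps : sub.isPrefixOf s = true := by
      simp only [List.isPrefixOf_iff_prefix]; simpa using hj
    rw [rfind_go_zero, if_pos hps]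
    simp
  | succ k ih =>
    intro j hjk hj habove
    by_cases hje : j = k + 1
    · subst hje
      rw [rfind_go_succ, if_pos (by simpa [List.isPrefixOf_iff_prefix] using hj)]
    · rw [rfind_go_succ, if_neg
        (by simp only [List.isPrefixOf_iff_prefix]; exact habove (k+1) (by omega) (le_refl _))]
      exact ih j (by omega) hj (fun i h1 h2 => habove i h1 (by omega))

theorem rfind_cases (s sub : List Char) :
    (PySem.Chars.rfind s sub = -1 ∧ ∀ i, i ≤ s.length → ¬ sub <+: s.drop i) ∨
    (∃ j : Nat, j ≤ s.length ∧ PySem.Chars.rfind s sub = j ∧ sub <+: s.drop j ∧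
      ∀ i, j < i → i ≤ s.length → ¬ sub <+: s.drop i) := by
  by_cases h : ∃ j, j ≤ s.length ∧ sub <+: s.drop j
  · right
    obtain ⟨j0, hj0, hp0⟩ := h
    refine ⟨Nat.findGreatest (fun i => sub <+: s.drop i) s.length, Nat.findGreatest_le _, ?_,
      Nat.findGreatest_spec (P := fun i => sub <+: List.drop i s) hj0 hp0, fun i h1 h2 => Nat.findGreatest_is_greatest (P := fun i => sub <+: List.drop i s) h1 h2⟩
    unfold PySem.Chars.rfind
    exact rfind_go_eq s sub s.length _ (Nat.findGreatest_le _)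
      (Nat.findGreatest_spec (P := fun i => sub <+: List.drop i s) hj0 hp0) (fun i h1 h2 => Nat.findGreatest_is_greatest (P := fun i => sub <+: List.drop i s) h1 h2)
  · left
    push Not at h
    exact ⟨by unfold PySem.Chars.rfind; exact rfind_go_neg s sub s.length h, h⟩

theorem rfind_neg_one_le (s sub : List Char) : -1 ≤ PySem.Chars.rfind s sub := by
  rcases rfind_cases s sub with ⟨h, _⟩ | ⟨j, _, h, _, _⟩ <;> rw [h] <;> omega

theorem rfind_shift {X T : List Char} (h : '\n' ∉ X) :
    PySem.Chars.rfind (X ++ '\n' :: T) ['\n'] =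
      if PySem.Chars.rfind T ['\n'] = -1 then (X.length : Int)
      else (X.length : Int) + 1 + PySem.Chars.rfind T ['\n'] := by
  rcases rfind_cases T ['\n'] with ⟨hT, hnone⟩ | ⟨j, hjle, hrT, hpj, habove⟩
  · rw [hT, if_pos rfl]
    unfold PySem.Chars.rfind
    apply rfind_go_eq
    · simp
    · rw [List.drop_left]
      exact ⟨T, rfl⟩
    · intro i h1 h2
      have hi : i = X.length + ((i - X.length - 1) + 1) := by omega
      rw [hi, List.drop_length_add_append, List.drop_succ_cons]
      apply hnone
      simp at h2
      omega
  · have hne : PySem.Chars.rfind T ['\n'] ≠ -1 := by rw [hrT]; omega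
    rw [if_neg hne, hrT]
    have : PySem.Chars.rfind (X ++ '\n' :: T) ['\n'] = ((X.length + 1 + j : Nat) : Int) := by
      unfold PySem.Chars.rfind
      apply rfind_go_eq
      · simp; omega
      · rw [show X.length + 1 + j = X.length + (j + 1) by omega,
          List.drop_length_add_append, List.drop_succ_cons]
        exact hpj
      · intro i h1 h2
        have hi : i = X.length + ((i - X.length - 1) + 1) := by omega
        rw [hi, List.drop_length_add_append, List.drop_succ_cons]
        apply habove
        · omega
        · simp at h2; omega
    rw [this]
    push_cast
    ring

theorem rfindFrom_take {cs : List Char} {p : Int} (h0 : 0 ≤ p) (hle : p ≤ cs.length) :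
    PySem.Chars.rfindFrom cs ['\n'] 0 (some p) = PySem.Chars.rfind (cs.take p.toNat) ['\n'] := by
  unfold PySem.Chars.rfindFrom
  have h1 : ¬ ((cs.length : Int) < p) := not_lt.mpr hle
  have h2 : ¬ (p < 0) := not_lt.mpr h0
  simp only [h1, if_false, h2]
  norm_num [h2]
  omega

-- ===== the glue: pvFirst?, marker facts, cores =====

def pvFirst? : List (List Char) → Option Nat
  | [] => none
  | line :: rest => if pvMatches line then some 0 else (pvFirst? rest).map (· + 1)

theorem pvFindMark_eq (ls : List (List Char)) (x : Nat) :
    pvFindMark x ls = match pvFirst? ls with | some i => x + i | none => 0 := by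
  induction ls generalizing x with
  | nil => rfl
  | cons line rest ih =>
    by_cases hml : pvMatches line = true
    · simp [pvFindMark, pvFirst?, hml]
    · cases hfm : pvFirst? rest with
      | none => simp [pvFindMark, pvFirst?, if_neg hml, ih, hfm]
      | some i =>
        simp only [pvFindMark, pvFirst?, if_neg hml, ih (x+1), hfm, Option.map_some]
        ring

theorem pvFirst?_none {ls : List (List Char)} (h : pvFirst? ls = none) :
    ∀ line ∈ ls, pvMatches line = false := by
  induction ls with
  | nil => simp
  | cons a t ih =>
    intro line hline
    by_cases hml : pvMatches a = true
    · simp [pvFirst?, hml] at h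
    · simp only [pvFirst?, if_neg hml, Option.map_eq_none_iff] at h
      rcases List.mem_cons.mp hline with rfl | hmem
      · simpa using hml
      · exact ih h line hmem

theorem pvFirst?_some {ls : List (List Char)} {i : Nat} (h : pvFirst? ls = some i) :
    ∃ line ∈ ls, pvMatches line = true := by
  induction ls generalizing i with
  | nil => simp [pvFirst?] at h
  | cons a t ih =>
    by_cases hml : pvMatches a = true
    · exact ⟨a, by simp, hml⟩
    · simp only [pvFirst?, if_neg hml, Option.map_eq_some_iff] at h
      obtain ⟨j, hj, _⟩ := h
      obtain ⟨line, hmem, hm⟩ := ih hj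
      exact ⟨line, by simp [hmem], hm⟩

set_option maxRecDepth 100000 in
theorem marks_props : ∀ m ∈ pvMarksA, m ≠ [] ∧ '\n' ∉ m ∧
    m.head?.all (fun a => !PySem.Chars.isspace a) = true ∧
    m.getLast?.all (fun b => !PySem.Chars.isspace b) = true := by decide

theorem pvMatches_of_infix {m line : List Char} (hm : m ∈ pvMarksA) (h : m <:+: line) :
    pvMatches line = true := by
  obtain ⟨hne, _, hhead, hlast⟩ := marks_props m hm
  cases hh : m.head? with
  | none => exact absurd (List.head?_eq_none_iff.mp hh) hne
  | some a =>
    cases hg : m.getLast? with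
    | none => exact absurd (List.getLast?_eq_none_iff.mp hg) hne
    | some b =>
      rw [hh] at hhead
      rw [hg] at hlast
      simp only [Option.all_some, Bool.not_eq_true'] at hhead hlast
      unfold pvMatches
      rw [List.any_eq_true]
      exact ⟨m, hm, (PySem.Chars.isIn_iff_infix _ _).mpr (infix_strip hh hhead hg hlast h)⟩

theorem infix_of_pvMatches {line : List Char} (h : pvMatches line = true) :
    ∃ m ∈ pvMarksA, m <:+: line := by
  unfold pvMatches at h
  rw [List.any_eq_true] at h
  obtain ⟨m, hm, hIn⟩ := h
  exact ⟨m, hm, ((PySem.Chars.isIn_iff_infix _ _).mp hIn).trans (strip_infix line)⟩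

-- list-level cores of the two ports
def pvAcore (cs : List Char) : List Char :=
  PySem.Chars.join ['\n'] ((pvSplit [] cs).drop (pvFindMark 0 (pvSplit [] cs)))

def pvBcore (cs : List Char) : List Char :=
  match PySem.List.min? ((pvMarksB.map (fun m => PySem.Chars.find cs m)).filter (fun p => p != -1)) (fun p => p) with
  | none => cs
  | some pmin => cs.drop (PySem.Chars.rfind (cs.take pmin.toNat) ['\n'] + 1).toNat

theorem positions_mem_spec {cs : List Char} {q : Int}
    (h : q ∈ (pvMarksB.map (fun m => PySem.Chars.find cs m)).filter (fun p => p != -1)) :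
    0 ≤ q ∧ q ≤ cs.length ∧ ∃ m ∈ pvMarksB, PySem.Chars.find cs m = q := by
  obtain ⟨hmem, hne⟩ := List.mem_filter.mp h
  obtain ⟨m, hm, rfl⟩ := List.mem_map.mp hmem
  have h1 := PySem.Chars.neg_one_le_find cs m
  have h2 := PySem.Chars.find_le_length cs m
  have h3 : PySem.Chars.find cs m ≠ -1 := by simpa using hne
  exact ⟨by omega, h2, m, hm, rfl⟩

theorem headerclean_eq_core (content : String) :
    headerclean content = String.ofList (pvAcore content.toList) := by
  simp only [headerclean, pvAcore, splitOn_eq_pvSplit]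
  rw [PySem.List.slice_from _ (Int.natCast_nonneg _), Int.toNat_natCast]

theorem headerclean_alt_eq_core (content : String) :
    headerclean_alt content = String.ofList (pvBcore content.toList) := by
  simp only [headerclean_alt, pvBcore]
  cases hmin : PySem.List.min? ((pvMarksB.map (fun m => PySem.Chars.find content.toList m)).filter (fun p => p != -1)) (fun p => p) with
  | none => simp only [hmin]; exact (String.ofList_toList (s := content)).symm
  | some p =>
    obtain ⟨h0, hle, _⟩ := positions_mem_spec (PySem.List.min?_mem hmin)
    simp only [hmin]
    rw [rfindFrom_take h0 hle,
      PySem.List.slice_from _ (by have := rfind_neg_one_le (content.toList.take p.toNat) ['\n']; omega)]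

theorem exists_first_nl {cs : List Char} (h : '\n' ∈ cs) :
    ∃ l rest, cs = l ++ '\n' :: rest ∧ '\n' ∉ l := by
  induction cs with
  | nil => simp at h
  | cons c cs' ih =>
    by_cases hc : c = '\n'
    · exact ⟨[], cs', by simp [hc], by simp⟩
    · have h' : '\n' ∈ cs' := by
        rcases List.mem_cons.mp h with h1 | h1
        · exact absurd h1.symm hc
        · exact h1
      obtain ⟨l, rest, heq, hl⟩ := ih h'
      refine ⟨c :: l, rest, by simp [heq], ?_⟩
      simp only [List.mem_cons, not_or]
      exact ⟨fun hh => hc hh.symm, hl⟩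

-- B returns the full string when the input has no newline at all
theorem pv_master_nonl {cs : List Char} (hnl : '\n' ∉ cs) : pvBcore cs = pvAcore cs := by
  have hA : pvAcore cs = cs := by
    unfold pvAcore
    rw [pvSplit_no_nl hnl]
    have h0 : ∀ L, pvFindMark 0 [L] = 0 := by
      intro L
      by_cases hm : pvMatches L = true <;> simp [pvFindMark, hm]
    rw [h0]
    simp [PySem.Chars.join_singleton]
  have hB : pvBcore cs = cs := by
    unfold pvBcore
    cases hmin : PySem.List.min? ((pvMarksB.map (fun m => PySem.Chars.find cs m)).filter (fun p => p != -1)) (fun p => p) with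
    | none => simp
    | some p =>
      simp only []
      have hnotin : '\n' ∉ cs.take p.toNat := fun hmem => hnl (List.mem_of_mem_take hmem)
      rw [rfind_no_nl hnotin]
      simp
  rw [hA, hB]

-- the drop positions agree after stepping over the first (markerless) line
theorem pvBcore_drop_shift {l rest : List Char} (hl : '\n' ∉ l) {pr : Int} (h0 : 0 ≤ pr) :
    (l ++ '\n' :: rest).drop
        (PySem.Chars.rfind ((l ++ '\n' :: rest).take (((l.length : Int) + 1 + pr)).toNat) ['\n'] + 1).toNat =
      rest.drop (PySem.Chars.rfind (rest.take pr.toNat) ['\n'] + 1).toNat := by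
  have htn : (((l.length : Int) + 1 + pr)).toNat = l.length + (pr.toNat + 1) := by omega
  rw [htn, List.take_length_add_append, List.take_succ_cons, rfind_shift hl]
  by_cases hr : PySem.Chars.rfind (rest.take pr.toNat) ['\n'] = -1
  · rw [if_pos hr, hr]
    have h1 : ((l.length : Int) + 1).toNat = l.length + 1 := by omega
    simp only [h1]
    rw [show l.length + 1 = l.length + (0 + 1) by omega, List.drop_length_add_append]
    simp
  · rw [if_neg hr]
    have hge : 0 ≤ PySem.Chars.rfind (rest.take pr.toNat) ['\n'] := by
      have := rfind_neg_one_le (rest.take pr.toNat) ['\n']; omega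
    have h2 : ((l.length : Int) + 1 + PySem.Chars.rfind (rest.take pr.toNat) ['\n'] + 1).toNat
        = l.length + ((PySem.Chars.rfind (rest.take pr.toNat) ['\n']).toNat + 2) := by omega
    rw [h2, List.drop_length_add_append]
    have h3 : (PySem.Chars.rfind (rest.take pr.toNat) ['\n'] + 1).toNat
        = (PySem.Chars.rfind (rest.take pr.toNat) ['\n']).toNat + 1 := by omega
    rw [h3]
    rfl

-- B steps over a markerless first line when some marker occurs later
theorem pvBcore_step {l rest : List Char} (hl : '\n' ∉ l)
    (hnotin : ∀ m ∈ pvMarksA, ¬ m <:+: l)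
    (hex : ∃ m ∈ pvMarksA, m <:+: rest) :
    pvBcore (l ++ '\n' :: rest) = pvBcore rest := by
  have hM1 : ("</SEC-HEADER>".toList) ∈ pvMarksA := by simp [pvMarksA]
  have hM2 : ("</IMS-HEADER>".toList) ∈ pvMarksA := by simp [pvMarksA]
  obtain ⟨_, hnl1, _, _⟩ := marks_props _ hM1
  obtain ⟨_, hnl2, _, _⟩ := marks_props _ hM2
  have hs1 := find_shift (l := l) (rest := rest) hnl1 (hnotin _ hM1)
  have hs2 := find_shift (l := l) (rest := rest) hnl2 (hnotin _ hM2)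
  have hge1 := PySem.Chars.neg_one_le_find rest ("</SEC-HEADER>".toList)
  have hge2 := PySem.Chars.neg_one_le_find rest ("</IMS-HEADER>".toList)
  by_cases h1 : PySem.Chars.find rest ("</SEC-HEADER>".toList) = -1 <;>
    by_cases h2 : PySem.Chars.find rest ("</IMS-HEADER>".toList) = -1
  · -- no marker in rest: contradicts hex
    exfalso
    obtain ⟨m, hm, hinf⟩ := hex
    rcases (by simpa [pvMarksA] using hm : m = "</SEC-HEADER>".toList ∨ m = "</IMS-HEADER>".toList) with rfl | rfl
    · exact (PySem.Chars.find_eq_neg_one_iff _ _).mp h1 hinf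
    · exact (PySem.Chars.find_eq_neg_one_iff _ _).mp h2 hinf
  · -- only the second marker occurs
    rw [if_pos h1] at hs1
    rw [if_neg h2] at hs2
    unfold pvBcore
    simp only [pvMarksB, List.map_cons, List.map_nil, hs1, hs2,
      List.filter_cons, List.filter_nil]
    have hb1 : ((-1 : Int) != -1) = false := by decide
    have hb2 : (((l.length : Int) + 1 + PySem.Chars.find rest ("</IMS-HEADER>".toList)) != -1) = true := by
      simp only [bne_iff_ne, Ne]; omega
    have hb2' : ((PySem.Chars.find rest ("</IMS-HEADER>".toList)) != -1) = true := by
      simp only [bne_iff_ne, Ne]; omega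
    simp only [h1, hb1, hb2, hb2', Bool.false_eq_true, if_false, if_true]
    simp only [PySem.List.min?, List.foldl_cons, List.foldl_nil]
    exact pvBcore_drop_shift hl (pr := PySem.Chars.find rest ("</IMS-HEADER>".toList)) (by omega)
  · -- only the first marker occurs
    rw [if_neg h1] at hs1
    rw [if_pos h2] at hs2
    unfold pvBcore
    simp only [pvMarksB, List.map_cons, List.map_nil, hs1, hs2,
      List.filter_cons, List.filter_nil]
    have hb1 : ((-1 : Int) != -1) = false := by decide
    have hb2 : (((l.length : Int) + 1 + PySem.Chars.find rest ("</SEC-HEADER>".toList)) != -1) = true := by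
      simp only [bne_iff_ne, Ne]; omega
    have hb2' : ((PySem.Chars.find rest ("</SEC-HEADER>".toList)) != -1) = true := by
      simp only [bne_iff_ne, Ne]; omega
    simp only [h2, hb1, hb2, hb2', Bool.false_eq_true, if_false, if_true]
    simp only [PySem.List.min?, List.foldl_cons, List.foldl_nil]
    exact pvBcore_drop_shift hl (pr := PySem.Chars.find rest ("</SEC-HEADER>".toList)) (by omega)
  · -- both markers occur
    rw [if_neg h1] at hs1
    rw [if_neg h2] at hs2
    unfold pvBcore
    simp only [pvMarksB, List.map_cons, List.map_nil, hs1, hs2,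
      List.filter_cons, List.filter_nil]
    have hb1 : (((l.length : Int) + 1 + PySem.Chars.find rest ("</SEC-HEADER>".toList)) != -1) = true := by
      simp only [bne_iff_ne, Ne]; omega
    have hb1' : ((PySem.Chars.find rest ("</SEC-HEADER>".toList)) != -1) = true := by
      simp only [bne_iff_ne, Ne]; omega
    have hb2 : (((l.length : Int) + 1 + PySem.Chars.find rest ("</IMS-HEADER>".toList)) != -1) = true := by
      simp only [bne_iff_ne, Ne]; omega
    have hb2' : ((PySem.Chars.find rest ("</IMS-HEADER>".toList)) != -1) = true := by
      simp only [bne_iff_ne, Ne]; omega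
    simp only [hb1, hb1', hb2, hb2', if_true]
    simp only [PySem.List.min?, List.foldl_cons, List.foldl_nil]
    by_cases hcmp : PySem.Chars.find rest ("</IMS-HEADER>".toList) <
        PySem.Chars.find rest ("</SEC-HEADER>".toList)
    · have hcmp' : (l.length : Int) + 1 + PySem.Chars.find rest ("</IMS-HEADER>".toList) <
          (l.length : Int) + 1 + PySem.Chars.find rest ("</SEC-HEADER>".toList) := by omega
      rw [if_pos hcmp, if_pos hcmp']
      exact pvBcore_drop_shift hl (pr := PySem.Chars.find rest ("</IMS-HEADER>".toList)) (by omega)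
    · have hcmp' : ¬ ((l.length : Int) + 1 + PySem.Chars.find rest ("</IMS-HEADER>".toList) <
          (l.length : Int) + 1 + PySem.Chars.find rest ("</SEC-HEADER>".toList)) := by omega
      rw [if_neg hcmp, if_neg hcmp']
      exact pvBcore_drop_shift hl (pr := PySem.Chars.find rest ("</SEC-HEADER>".toList)) (by omega)

theorem pv_master_aux : ∀ (n : Nat) (cs : List Char), cs.length ≤ n → pvBcore cs = pvAcore cs := by
  intro n
  induction n with
  | zero =>
    intro cs h
    have : cs = [] := List.eq_nil_of_length_eq_zero (by omega)
    subst this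
    exact pv_master_nonl (by simp)
  | succ n ih =>
    intro cs hlen
    by_cases hnl : '\n' ∈ cs
    · obtain ⟨l, rest, rfl, hl⟩ := exists_first_nl hnl
      have hsplit : pvSplit [] (l ++ '\n' :: rest) = l :: pvSplit [] rest := by
        simpa using pvSplit_append hl [] rest
      by_cases hml : pvMatches l = true
      · -- the first line matches: both sides return the whole string
        have hA : pvAcore (l ++ '\n' :: rest) = l ++ '\n' :: rest := by
          unfold pvAcore
          rw [hsplit, show pvFindMark 0 (l :: pvSplit [] rest) = 0 by simp [pvFindMark, hml],
            List.drop_zero, ← hsplit]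
          simpa using join_pvSplit (l ++ '\n' :: rest) []
        obtain ⟨m, hm, hinf⟩ := infix_of_pvMatches hml
        obtain ⟨hne, hnlm, _, _⟩ := marks_props m hm
        obtain ⟨hf0, hflt⟩ := find_lt_of_infix_left ('\n' :: rest) hinf hne
        unfold pvBcore
        cases hmin : PySem.List.min? ((pvMarksB.map (fun m => PySem.Chars.find (l ++ '\n' :: rest) m)).filter (fun p => p != -1)) (fun p => p) with
        | none =>
          exfalso
          have hfmem : PySem.Chars.find (l ++ '\n' :: rest) m ∈
              ((pvMarksB.map (fun m => PySem.Chars.find (l ++ '\n' :: rest) m)).filter (fun p => p != -1)) := by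
            refine List.mem_filter.mpr ⟨List.mem_map.mpr ⟨m, hm, rfl⟩, ?_⟩
            simp only [bne_iff_ne, Ne]
            omega
          rw [PySem.List.min?_eq_none_iff] at hmin
          rw [hmin] at hfmem
          simp at hfmem
        | some p =>
          have hple : p ≤ PySem.Chars.find (l ++ '\n' :: rest) m := by
            refine PySem.List.min?_isMin hmin _ ?_
            refine List.mem_filter.mpr ⟨List.mem_map.mpr ⟨m, hm, rfl⟩, ?_⟩
            simp only [bne_iff_ne, Ne]
            omega
          have hp0 : 0 ≤ p := (positions_mem_spec (PySem.List.min?_mem hmin)).1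
          simp only []
          have htake : (l ++ '\n' :: rest).take p.toNat = l.take p.toNat :=
            List.take_append_of_le_length (by omega)
          rw [htake, rfind_no_nl (fun hmem => hl (List.mem_of_mem_take hmem))]
          simpa using hA.symm
      · -- the first line has no marker
        have hnotin : ∀ m ∈ pvMarksA, ¬ m <:+: l := fun m hm hc => hml (pvMatches_of_infix hm hc)
        cases hfm : pvFirst? (pvSplit [] rest) with
        | none =>
          -- no marker anywhere: both sides return the whole string
          have hnone : ∀ m ∈ pvMarksA, PySem.Chars.find (l ++ '\n' :: rest) m = -1 := by
            intro m hm
            rw [PySem.Chars.find_eq_neg_one_iff]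
            intro hc
            obtain ⟨hne, hnlm, _, _⟩ := marks_props m hm
            rcases infix_split hnlm hc with h' | h'
            · exact hnotin m hm h'
            · obtain ⟨line, hline, hlinf⟩ := join_infix hnlm hne (pvSplit [] rest)
                (by rw [join_pvSplit]; simpa using h')
              have hmt := pvMatches_of_infix hm hlinf
              rw [pvFirst?_none hfm line hline] at hmt
              simp at hmt
          have hA : pvAcore (l ++ '\n' :: rest) = l ++ '\n' :: rest := by
            unfold pvAcore
            rw [hsplit, pvFindMark_eq,
              show pvFirst? (l :: pvSplit [] rest) = none by simp [pvFirst?, hml, hfm]]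
            rw [List.drop_zero, ← hsplit]
            simpa using join_pvSplit (l ++ '\n' :: rest) []
          have hB : pvBcore (l ++ '\n' :: rest) = l ++ '\n' :: rest := by
            unfold pvBcore
            have hf1 := hnone _ (show ("</SEC-HEADER>".toList) ∈ pvMarksA by simp [pvMarksA])
            have hf2 := hnone _ (show ("</IMS-HEADER>".toList) ∈ pvMarksA by simp [pvMarksA])
            simp only [pvMarksB, List.map_cons, List.map_nil, hf1, hf2,
              List.filter_cons, List.filter_nil]
            simp [PySem.List.min?]
          rw [hA, hB]
        | some i =>
          -- first marker line is inside rest: both sides step over the first line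
          have hA : pvAcore (l ++ '\n' :: rest) = pvAcore rest := by
            unfold pvAcore
            rw [hsplit, pvFindMark_eq, pvFindMark_eq,
              show pvFirst? (l :: pvSplit [] rest) = some (i+1) by simp [pvFirst?, hml, hfm], hfm]
            simp
          have hex : ∃ m ∈ pvMarksA, m <:+: rest := by
            obtain ⟨line, hline, hmt⟩ := pvFirst?_some hfm
            obtain ⟨m0, hm0, hm0inf⟩ := infix_of_pvMatches hmt
            exact ⟨m0, hm0, hm0inf.trans (by simpa using mem_pvSplit_infix hline)⟩
          rw [pvBcore_step hl hnotin hex, hA]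
          exact ih rest (by simp at hlen; omega)
    · exact pv_master_nonl hnl

theorem pv_master (cs : List Char) : pvBcore cs = pvAcore cs :=
  pv_master_aux cs.length cs (le_refl _)

-- ===== VERDICT (by name: the statement is the Claim_ definition above) =====
theorem headerclean_spec : Claim_equal_headerclean := by
  intro content _
  show headerclean content = headerclean_alt content
  rw [headerclean_eq_core, headerclean_alt_eq_core, pv_master]
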